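-- pv_equiv track=rewrite | github.com/gwallison/FF-POC | core/CAS_tools.py | is_valid_CAS_code
-- ===== SOURCE A (Python) =====
-- def is_valid_CAS_code(cas):
--     """checks if number follows strictest format of CAS registry numbers
--     three sections separated by '-', section 1 is 2-7 digits with no
--     leading zeros, section 2 is two digits (no dropping leading zero),
--     check digit is just one digit that satisfies validation algorithm.
--     No extraneous characters."""
--     try:
--         for c in cas:
--             err = False
--             if c not in ['0','1','2','3','4','5','6','7','8','9','-']:
--                 err = True
--                 break
--         if err: return False
--         lst = cas.split('-')
--         if len(lst)!=3 : return False
--         if len(lst[2])!=1 : return False # check digit must be a single digit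
--         if lst[0][0] == '0': return False # leading zeros not allowed
--         s1int = int(lst[0])
--         if s1int > 9999999: return False
--         if s1int < 10: return False
--         s2int = int(lst[1])
--         if s2int > 99: return False
--         if len(lst[1])!=2: return False # must be two digits, even if <10
--
--         # validate test digit
--         teststr = lst[0]+lst[1]
--         teststr = teststr[::-1] # reverse for easy calculation
--         accum = 0
--         for i,digit in enumerate(teststr):
--             accum += (i+1)*int(digit)
--         if accum%10 != int(lst[2]):
--             return False
--         return True
--     except:
--         return False
-- ===== SOURCE B (Python) =====
-- def is_valid_CAS_code(cas):
--     # Single left-to-right scan: a tiny state machine over the three dash-separated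
--     # sections, computing the check sum on the fly as a double accumulator
--     # (running digit sum s, prefix-sum total t) instead of reversing and weighting.
--     section = 0   # which dash-separated section we are in
--     count = 0     # digits seen in the current section
--     s = 0         # running sum of digits of sections 1+2
--     t = 0         # running sum of prefix sums == sum of (n-i)*digit_i
--     check = -1    # the check digit, once seen
--     for c in cas:
--         if c == '-':
--             if section == 0 and not (2 <= count <= 7):
--                 return False
--             if section == 1 and count != 2:
--                 return False
--             if section >= 2:
--                 return False
--             section += 1
--             count = 0
--         elif '0' <= c <= '9':
--             d = ord(c) - 48
--             if count == 0 and section == 0 and d == 0: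
--                 return False  # leading zero in section 1
--             count += 1
--             if section < 2:
--                 s += d
--                 t += s
--             else:
--                 if count > 1:
--                     return False
--                 check = d
--         else:
--             return False
--     return section == 2 and count == 1 and t % 10 == check
-- ===== Notes on version B (the rewrite author's own statement) =====
-- stated objective: alternative
-- what changed: Replaces A's staged pipeline (character-whitelist loop, dash-splitting, int() range tests, then a reversed positionally-weighted checksum loop) by one left-to-right pass: a small state machine over the three sections that validates lengths at each separator and accumulates the checksum as a running prefix-sum pair (s,t), with no splitting, no int() of substrings and no reversal.
import Mathlib
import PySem

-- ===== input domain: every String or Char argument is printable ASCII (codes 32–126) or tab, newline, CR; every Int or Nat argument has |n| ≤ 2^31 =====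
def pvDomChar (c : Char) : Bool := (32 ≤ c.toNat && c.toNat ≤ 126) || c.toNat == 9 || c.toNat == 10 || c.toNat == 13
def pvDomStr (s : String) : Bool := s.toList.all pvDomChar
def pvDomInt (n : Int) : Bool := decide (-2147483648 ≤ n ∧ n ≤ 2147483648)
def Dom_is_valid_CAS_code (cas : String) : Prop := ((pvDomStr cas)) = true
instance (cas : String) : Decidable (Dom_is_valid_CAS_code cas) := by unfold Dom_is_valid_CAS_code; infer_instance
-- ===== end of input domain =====

-- B: same CAS validation by a different algorithm — one left-to-right state-machine pass over the string
-- (section/count tracking plus a prefix-sum checksum accumulator) replaces A's whitelist loop, dash-splitting,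
-- int() range tests and reversed positionally-weighted checksum loop.


-- ===== PORT A =====
-- the list literal ['0',…,'9','-'] of A's membership test
def pvValidChars : List Char := ['0','1','2','3','4','5','6','7','8','9','-']

-- the for-loop over cas: err is True iff it hit (and broke on) a character outside the whitelist
def pvLoopErr : List Char → Bool
  | [] => false
  | c :: rest => if !(pvValidChars.contains c) then true else pvLoopErr rest

-- int(digit) for a single decimal-digit character, i.e. ord(digit) - 48; exact on digit characters
def pvDigitVal (d : Char) : Int := (d.toNat : Int) - 48

-- int(s) ported by hand for the only strings that can reach A's int() calls (pieces of a '-'-split of a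
-- string of digits and dashes, so s is all decimal digits, possibly empty); exact there:
-- ValueError (none) on the empty string, else the decimal value.
def pvIntDigits? (ds : List Char) : Option Int :=
  if ds.isEmpty then none else some (ds.foldl (fun a d => 10 * a + pvDigitVal d) 0)

def is_valid_CAS_code (cas : String) : Bool :=
  match cas.toList with
  | [] => false  -- empty cas: the for-loop never runs, 'err' is unbound → NameError, caught by the bare except
  | l =>
    if pvLoopErr l then false
    else
      -- lst = cas.split('-'); if len(lst)!=3: return False; s1,s2,s3 stand for lst[0],lst[1],lst[2]
      match PySem.Chars.splitOn l ['-'] with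
      | [s1, s2, s3] =>
        if s3.length ≠ 1 then false
        else
          match PySem.List.pyGet? s1 0 with
          | none => false  -- lst[0][0] raises IndexError, caught by the bare except
          | some c0 =>
            if c0 = '0' then false
            else
              match pvIntDigits? s1 with
              | none => false  -- int('') raises ValueError, caught
              | some s1int =>
                if s1int > 9999999 then false
                else if s1int < 10 then false
                else
                  match pvIntDigits? s2 with
                  | none => false  -- ValueError, caught
                  | some s2int =>
                    if s2int > 99 then false
                    else if s2.length ≠ 2 then false
                    else
                      let teststr := (s1 ++ s2).reverse
                      let accum :=
                        (PySem.List.enumerate teststr).foldl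
                          (fun a p => a + (p.1 + 1) * pvDigitVal p.2) 0
                      match pvIntDigits? s3 with
                      | none => false
                      | some s3int =>
                        if PySem.Int.mod accum 10 ≠ s3int then false else true
      | _ => false

-- ===== PORT B =====
-- the scan loop of Source B: state (section, count, s, t, check), early returns become false results
def pvScan : List Char → Int → Int → Int → Int → Int → Bool
  | [], sec, count, _s, t, check =>
      -- return section == 2 and count == 1 and t % 10 == check
      decide (sec = 2 ∧ count = 1 ∧ PySem.Int.mod t 10 = check)
  | c :: rest, sec, count, s, t, check =>
      if c = '-' then
        if sec = 0 ∧ ¬(2 ≤ count ∧ count ≤ 7) then false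
        else if sec = 1 ∧ count ≠ 2 then false
        else if 2 ≤ sec then false
        else pvScan rest (sec + 1) 0 s t check
      else if '0' ≤ c ∧ c ≤ '9' then
        -- d = ord(c) - 48
        let d : Int := pvDigitVal c
        if count = 0 ∧ sec = 0 ∧ d = 0 then false  -- leading zero in section 1
        else
          let count' := count + 1
          if sec < 2 then pvScan rest sec count' (s + d) (t + (s + d)) check
          else if 1 < count' then false
          else pvScan rest sec count' s t d
      else false

def is_valid_CAS_code_alt (cas : String) : Bool :=
  pvScan cas.toList 0 0 0 0 (-1)

-- ===== PRECONDITION & SPEC =====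
def Spec_is_valid_CAS_code (cas : String) (out : Bool) : Prop := out = is_valid_CAS_code_alt cas
instance (cas : String) (out : Bool) : Decidable (Spec_is_valid_CAS_code cas out) := by unfold Spec_is_valid_CAS_code; infer_instance

-- ===== CLAIM (what is proved, stated in full; the proofs are below) =====
def Claim_equal_is_valid_CAS_code : Prop := ∀ (cas : String), Dom_is_valid_CAS_code cas → Spec_is_valid_CAS_code cas (is_valid_CAS_code cas)

-- ===== LEMMAS AND PROOFS =====

-- a clean structural model of s.split('-') (single-character separator)
def pvSplit : List Char → List (List Char)
  | [] => [[]]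
  | c :: rest =>
    if c = '-' then [] :: pvSplit rest
    else
      match pvSplit rest with
      | p :: ps => (c :: p) :: ps
      | [] => [[c]]

-- rejoining the split pieces with dashes
def pvJoin : List (List Char) → List Char
  | [] => []
  | [p] => p
  | p :: ps => p ++ '-' :: pvJoin ps

-- sum of the digit values of a digit string
def pvDsum : List Char → Int
  | [] => 0
  | d :: r => pvDigitVal d + pvDsum r

-- the CAS checksum: digit at offset i (0-based from the left) of an n-digit string has weight n-i
def pvWsum : List Char → Int
  | [] => 0
  | d :: r => pvDigitVal d * (1 + r.length) + pvWsum r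

theorem pvSplit_ne_nil (l : List Char) : pvSplit l ≠ [] := by
  cases l with
  | nil => simp [pvSplit]
  | cons c rest =>
    simp only [pvSplit]
    split <;> [skip; split] <;> simp

theorem pvSplitOn_go_eq (fuel : Nat) (l cur : List Char) (acc : List (List Char))
    (h : l.length < fuel) :
    PySem.Chars.splitOn.go ['-'] fuel l cur acc =
      acc.reverse ++
        (match pvSplit l with
         | p :: ps => (cur.reverse ++ p) :: ps
         | [] => []) := by
  induction fuel generalizing l cur acc with
  | zero => omega
  | succ fuel ih =>
    cases l with
    | nil => simp [PySem.Chars.splitOn.go, pvSplit]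
    | cons c rest =>
      by_cases hc : c = '-'
      · subst hc
        rw [show PySem.Chars.splitOn.go ['-'] (fuel+1) ('-'::rest) cur acc
              = PySem.Chars.splitOn.go ['-'] fuel rest [] (cur.reverse :: acc) by
            simp [PySem.Chars.splitOn.go, List.isPrefixOf]]
        rw [ih rest [] _ (by simpa using Nat.lt_of_succ_lt_succ h)]
        rcases hps : pvSplit rest with _ | ⟨p, ps⟩
        · exact absurd hps (pvSplit_ne_nil rest)
        · simp [pvSplit, hps]
      · rw [show PySem.Chars.splitOn.go ['-'] (fuel+1) (c::rest) cur acc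
              = PySem.Chars.splitOn.go ['-'] fuel rest (c :: cur) acc by
            simp only [PySem.Chars.splitOn.go, List.isPrefixOf, Bool.and_true]
            rw [if_neg (by simp [Ne.symm hc])]]
        rw [ih rest (c :: cur) _ (by simpa using Nat.lt_of_succ_lt_succ h)]
        rcases hps : pvSplit rest with _ | ⟨p, ps⟩
        · exact absurd hps (pvSplit_ne_nil rest)
        · simp [pvSplit, hc, hps]

theorem pvSplitOn_eq (l : List Char) : PySem.Chars.splitOn l ['-'] = pvSplit l := by
  rw [PySem.Chars.splitOn, pvSplitOn_go_eq _ _ _ _ (by omega)]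
  rcases hps : pvSplit l with _ | ⟨p, ps⟩
  · exact absurd hps (pvSplit_ne_nil l)
  · simp

theorem pvSplit_flatten (l : List Char) :
    (pvSplit l).flatten = l.filter (fun c => !(c == '-')) := by
  induction l with
  | nil => simp [pvSplit]
  | cons c rest ih =>
    by_cases hc : c = '-'
    · subst hc; simp [pvSplit, ih]
    · simp only [pvSplit, if_neg hc]
      rcases hps : pvSplit rest with _ | ⟨p, ps⟩
      · exact absurd hps (pvSplit_ne_nil rest)
      · rw [hps] at ih
        simp_all

theorem pvSplit_length (l : List Char) : (pvSplit l).length = l.count '-' + 1 := by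
  induction l with
  | nil => simp [pvSplit]
  | cons c rest ih =>
    by_cases hc : c = '-'
    · subst hc; simp [pvSplit, ih]
    · simp only [pvSplit, if_neg hc]
      rcases hps : pvSplit rest with _ | ⟨p, ps⟩
      · exact absurd hps (pvSplit_ne_nil rest)
      · rw [hps] at ih
        simp_all

theorem pvJoin_pvSplit (l : List Char) : pvJoin (pvSplit l) = l := by
  induction l with
  | nil => simp [pvSplit, pvJoin]
  | cons c rest ih =>
    by_cases hc : c = '-'
    · subst hc
      simp only [pvSplit, if_pos rfl]
      rcases hps : pvSplit rest with _ | ⟨p, ps⟩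
      · exact absurd hps (pvSplit_ne_nil rest)
      · rw [hps] at ih; simp [pvJoin, ih]
    · simp only [pvSplit, if_neg hc]
      rcases hps : pvSplit rest with _ | ⟨p, ps⟩
      · exact absurd hps (pvSplit_ne_nil rest)
      · rw [hps] at ih
        rcases ps with _ | ⟨q, qs⟩
        · simpa [pvJoin] using ih
        · simpa [pvJoin] using ih

theorem pvLoopErr_eq (l : List Char) :
    pvLoopErr l = !(l.all (fun c => pvValidChars.contains c)) := by
  induction l with
  | nil => simp [pvLoopErr]
  | cons c rest ih => by_cases hc : pvValidChars.contains c <;> simp [pvLoopErr, hc, ih]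

theorem pvContains_valid (c : Char) :
    pvValidChars.contains c = (PySem.Chars.isdigit c || c == '-') := by
  rw [Bool.eq_iff_iff]
  have hinj : ∀ d : Char, c = d ↔ c.toNat = d.toNat :=
    fun d => ⟨fun h => h ▸ rfl, fun h => Char.ext (UInt32.toNat_inj.mp h)⟩
  have hle1 : '0' ≤ c ↔ 48 ≤ c.toNat := by rw [Char.le_def]; exact Iff.rfl
  have hle2 : c ≤ '9' ↔ c.toNat ≤ 57 := by rw [Char.le_def]; exact Iff.rfl
  simp only [pvValidChars, List.contains_eq_mem, List.mem_cons, PySem.Chars.isdigit,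
    Bool.or_eq_true, Bool.and_eq_true, decide_eq_true_eq, beq_iff_eq, hinj, hle1, hle2,
    show ('0').toNat = 48 from rfl, show ('1').toNat = 49 from rfl,
    show ('2').toNat = 50 from rfl, show ('3').toNat = 51 from rfl,
    show ('4').toNat = 52 from rfl, show ('5').toNat = 53 from rfl,
    show ('6').toNat = 54 from rfl, show ('7').toNat = 55 from rfl,
    show ('8').toNat = 56 from rfl, show ('9').toNat = 57 from rfl,
    show ('-').toNat = 45 from rfl]
  simp only [List.mem_nil_iff, or_false]
  omega

theorem pvDigit_ne_dash (c : Char) (h : '0' ≤ c ∧ c ≤ '9') : c ≠ '-' := by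
  intro hc
  subst hc
  have h1 : (48:UInt32) ≤ '-'.val := h.1
  simp [show ('-').val = 45 from rfl] at h1

theorem pvIsdigit_iff (c : Char) : PySem.Chars.isdigit c = true ↔ ('0' ≤ c ∧ c ≤ '9') := by
  simp [PySem.Chars.isdigit]

theorem pvDigitVal_bounds (d : Char) (h : PySem.Chars.isdigit d = true) :
    0 ≤ pvDigitVal d ∧ pvDigitVal d ≤ 9 := by
  have h1 : '0' ≤ d ∧ d ≤ '9' := by simpa [PySem.Chars.isdigit] using h
  have h2 : 48 ≤ d.toNat := by rw [← show ('0').toNat = 48 from rfl]; exact h1.1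
  have h3 : d.toNat ≤ 57 := by rw [← show ('9').toNat = 57 from rfl]; exact h1.2
  unfold pvDigitVal; omega

theorem pvDigitVal_pos (d : Char) (h : PySem.Chars.isdigit d = true) (h0 : d ≠ '0') :
    1 ≤ pvDigitVal d := by
  have hb := pvDigitVal_bounds d h
  have : d.toNat ≠ 48 := fun hc => h0 (Char.ext (UInt32.toNat_inj.mp hc))
  have : pvDigitVal d ≠ 0 := by unfold pvDigitVal at *; omega
  omega

theorem pvFold_acc (ds : List Char) (a : Int) :
    ds.foldl (fun a d => 10 * a + pvDigitVal d) a
      = a * 10 ^ ds.length + ds.foldl (fun a d => 10 * a + pvDigitVal d) 0 := by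
  induction ds generalizing a with
  | nil => simp
  | cons d t ih =>
    simp only [List.foldl_cons, List.length_cons]
    rw [ih (10 * a + pvDigitVal d), ih (10 * 0 + pvDigitVal d)]
    ring

theorem pvFold_nonneg (ds : List Char) (h : ∀ d ∈ ds, PySem.Chars.isdigit d = true) :
    0 ≤ ds.foldl (fun a d => 10 * a + pvDigitVal d) 0 := by
  induction ds with
  | nil => simp
  | cons d t ih =>
    simp only [List.foldl_cons]
    rw [pvFold_acc]
    have hd := pvDigitVal_bounds d (h d (by simp))
    have ht := ih (fun x hx => h x (by simp [hx]))
    have : (0:Int) ≤ 10 ^ t.length := by positivity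
    nlinarith

theorem pvFold_lt (ds : List Char) (h : ∀ d ∈ ds, PySem.Chars.isdigit d = true) :
    ds.foldl (fun a d => 10 * a + pvDigitVal d) 0 < 10 ^ ds.length := by
  induction ds with
  | nil => simp
  | cons d t ih =>
    simp only [List.foldl_cons, List.length_cons]
    rw [pvFold_acc]
    have hd := pvDigitVal_bounds d (h d (by simp))
    have ht := ih (fun x hx => h x (by simp [hx]))
    have hp : (0:Int) < 10 ^ t.length := by positivity
    calc (10 * 0 + pvDigitVal d) * 10 ^ t.length + t.foldl (fun a d => 10 * a + pvDigitVal d) 0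
        < (pvDigitVal d + 1) * 10 ^ t.length := by nlinarith
      _ ≤ 10 ^ (t.length + 1) := by rw [pow_succ]; nlinarith

theorem pvFold_ge (d : Char) (t : List Char) (h : ∀ x ∈ d :: t, PySem.Chars.isdigit x = true)
    (hd : 1 ≤ pvDigitVal d) :
    10 ^ t.length ≤ (d :: t).foldl (fun a d => 10 * a + pvDigitVal d) 0 := by
  simp only [List.foldl_cons]
  rw [pvFold_acc]
  have ht := pvFold_nonneg t (fun x hx => h x (by simp [hx]))
  have hp : (0:Int) < 10 ^ t.length := by positivity
  nlinarith

theorem pvEnumerate_shift {α : Type} (xs : List α) (s : Int) (f : Int → α → Int) :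
    ((PySem.List.enumerate xs (s + 1)).map (fun p => f p.1 p.2)).sum
      = ((PySem.List.enumerate xs s).map (fun p => f (p.1 + 1) p.2)).sum := by
  induction xs generalizing s f with
  | nil => simp [PySem.List.enumerate]
  | cons x t ih => simp [PySem.List.enumerate, ih (s+1) f, ih s (fun i c => f (i+1) c)]

theorem pvChecksum_rev (ds : List Char) :
    ((PySem.List.enumerate ds.reverse 0).map (fun p => (p.1 + 1) * pvDigitVal p.2)).sum
      = ((PySem.List.enumerate ds 0).map
          (fun p => ((ds.length : Int) - p.1) * pvDigitVal p.2)).sum := by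
  induction ds with
  | nil => simp
  | cons d t ih =>
    rw [List.reverse_cons, PySem.List.enumerate_append]
    simp only [List.map_append, List.sum_append, List.length_reverse, zero_add]
    rw [ih]
    simp only [PySem.List.enumerate, List.map_cons, List.sum_cons]
    rw [pvEnumerate_shift t 0 (fun i c => ((↑(d :: t).length : Int) - i) * pvDigitVal c)]
    have : (fun (p : Int × Char) => ((↑(d :: t).length : Int) - (p.1 + 1)) * pvDigitVal p.2)
         = (fun p => ((t.length : Int) - p.1) * pvDigitVal p.2) := by
      funext p; simp only [List.length_cons]; push_cast; ring
    rw [this]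
    simp only [List.map_nil, List.sum_nil, add_zero, List.length_cons]
    push_cast
    ring

theorem pvWsum_eq (ds : List Char) :
    ((PySem.List.enumerate ds 0).map
        (fun p => ((ds.length : Int) - p.1) * pvDigitVal p.2)).sum = pvWsum ds := by
  induction ds with
  | nil => simp [pvWsum]
  | cons d t ih =>
    simp only [PySem.List.enumerate, List.map_cons, List.sum_cons, pvWsum, zero_add]
    rw [show PySem.List.enumerate t 1 = PySem.List.enumerate t (0+1) from by norm_num,
        pvEnumerate_shift t 0 (fun i c => ((↑(d :: t).length : Int) - i) * pvDigitVal c)]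
    have : (fun (p : Int × Char) => ((↑(d :: t).length : Int) - (p.1 + 1)) * pvDigitVal p.2)
         = (fun p => ((t.length : Int) - p.1) * pvDigitVal p.2) := by
      funext p; simp only [List.length_cons]; push_cast; ring
    rw [this, ih]
    simp only [List.length_cons]
    push_cast
    ring

theorem pvWsum_append (p q : List Char) :
    pvWsum (p ++ q) = pvWsum p + (q.length : Int) * pvDsum p + pvWsum q := by
  induction p with
  | nil => simp [pvWsum, pvDsum]
  | cons d r ih =>
    simp only [List.cons_append, pvWsum, pvDsum, List.length_append, ih]
    push_cast
    ring

-- one scan step on a dash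
theorem pvScanDash (l : List Char) (sec cnt s t chk : Int) :
    pvScan ('-' :: l) sec cnt s t chk =
      if sec = 0 ∧ ¬(2 ≤ cnt ∧ cnt ≤ 7) then false
      else if sec = 1 ∧ cnt ≠ 2 then false
      else if 2 ≤ sec then false
      else pvScan l (sec + 1) 0 s t chk := by
  simp [pvScan]

-- one scan step on a decimal digit
theorem pvScanDigit (c : Char) (l : List Char) (sec cnt s t chk : Int)
    (hc : '0' ≤ c ∧ c ≤ '9') :
    pvScan (c :: l) sec cnt s t chk =
      if cnt = 0 ∧ sec = 0 ∧ pvDigitVal c = 0 then false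
      else if sec < 2 then pvScan l sec (cnt + 1) (s + pvDigitVal c) (t + (s + pvDigitVal c)) chk
      else if 1 < cnt + 1 then false
      else pvScan l sec (cnt + 1) s t (pvDigitVal c) := by
  simp [pvScan, pvDigit_ne_dash c hc, hc]

-- the scan through a run of digit characters in section 0 (past the first digit) or 1
theorem pvScanRun (p : List Char) : ∀ (l' : List Char) (sec cnt s t chk : Int),
    (sec = 0 ∨ sec = 1) → (sec = 1 ∨ 1 ≤ cnt) →
    (∀ c ∈ p, '0' ≤ c ∧ c ≤ '9') →
    pvScan (p ++ l') sec cnt s t chk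
      = pvScan l' sec (cnt + p.length) (s + pvDsum p) (t + (p.length : Int) * s + pvWsum p) chk := by
  induction p with
  | nil => intro l' sec cnt s t chk _ _ _; simp [pvDsum, pvWsum]
  | cons d r ih =>
    intro l' sec cnt s t chk hsec hcnt hdig
    have hd := hdig d (by simp)
    have hnd : d ≠ '-' := pvDigit_ne_dash d hd
    have hguard : ¬(cnt = 0 ∧ sec = 0 ∧ pvDigitVal d = 0) := by
      rintro ⟨h1, h2, _⟩; rcases hcnt with h | h <;> omega
    simp only [List.cons_append, pvScan, if_neg hnd, if_pos hd, if_neg hguard,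
      if_pos (show sec < 2 by rcases hsec with h | h <;> omega)]
    rw [ih (l') sec (cnt + 1) (s + pvDigitVal d) (t + (s + pvDigitVal d)) chk hsec
        (match hcnt with | Or.inl h => Or.inl h | Or.inr h => Or.inr (by omega))
        (fun c hc => hdig c (by simp [hc]))]
    simp only [pvDsum, pvWsum, List.length_cons]
    congr 1 <;> push_cast <;> ring

-- the scan in section 2 with one digit already consumed can never succeed on more input
theorem pvScan21 (d : Char) (rest : List Char) (s t chk : Int) :
    pvScan (d :: rest) 2 1 s t chk = false := by
  by_cases hd : d = '-'
  · subst hd; simp [pvScan]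
  · by_cases hdig : '0' ≤ d ∧ d ≤ '9' <;> simp [pvScan, hd, hdig]

-- the scan over the final (check-digit) section
theorem pvScan2 (p : List Char) (s t chk : Int) :
    pvScan p 2 0 s t chk =
      match p with
      | [c] => if '0' ≤ c ∧ c ≤ '9' then decide (PySem.Int.mod t 10 = pvDigitVal c) else false
      | _ => false := by
  match p with
  | [] => simp [pvScan]
  | [c] =>
    by_cases hc : c = '-'
    · subst hc
      have : ¬ ('0' ≤ '-' ∧ '-' ≤ '9') := fun h => pvDigit_ne_dash '-' h rfl
      simp [pvScan, this]
    · by_cases hdig : '0' ≤ c ∧ c ≤ '9' <;> simp [pvScan, hc, hdig]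
  | c :: d :: rest =>
    by_cases hc : c = '-'
    · subst hc; simp [pvScan]
    · by_cases hdig : '0' ≤ c ∧ c ≤ '9'
      · simp [pvScan, hc, hdig, pvScan21]
      · simp [pvScan, hc, hdig]

-- a successful scan saw exactly (2 - starting section) dashes
theorem pvScan_count (l : List Char) : ∀ sec cnt s t chk,
    pvScan l sec cnt s t chk = true → (l.count '-' : Int) = 2 - sec := by
  induction l with
  | nil =>
    intro sec cnt s t chk h
    simp only [pvScan, decide_eq_true_eq] at h
    simp [h.1]
  | cons c rest ih =>
    intro sec cnt s t chk h
    by_cases hc : c = '-'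
    · subst hc
      have hcount : (('-' :: rest).count '-' : Int) = (rest.count '-' : Int) + 1 := by
        simp [List.count_cons]
      simp only [pvScan, if_pos rfl] at h
      split_ifs at h
      all_goals
        have := ih (sec + 1) 0 s t chk h
        rw [hcount]
        omega
    · have hcount : ((c :: rest).count '-' : Int) = (rest.count '-' : Int) := by
        simp only [List.count_cons]
        norm_num [hc]
      rw [hcount]
      simp only [pvScan, if_neg hc] at h
      split_ifs at h
      · exact ih sec (cnt + 1) (s + pvDigitVal c) (t + (s + pvDigitVal c)) chk h
      · exact ih sec (cnt + 1) s t (pvDigitVal c) h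

-- a successful scan saw only dashes and decimal digits
theorem pvScan_valid (l : List Char) : ∀ sec cnt s t chk,
    pvScan l sec cnt s t chk = true → ∀ c ∈ l, c = '-' ∨ ('0' ≤ c ∧ c ≤ '9') := by
  induction l with
  | nil => intro _ _ _ _ _ _ c hc; exact absurd hc (List.not_mem_nil)
  | cons c rest ih =>
    intro sec cnt s t chk h x hx
    rcases List.mem_cons.mp hx with hx2 | hx2
    · subst hx2
      by_cases hc : x = '-'
      · exact Or.inl hc
      · simp only [pvScan, if_neg hc] at h
        split_ifs at h with h1 h2 h3 h4
        · exact Or.inr h1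
        · exact Or.inr h1
    · by_cases hc : c = '-'
      · subst hc
        simp only [pvScan] at h
        split_ifs at h
        all_goals exact ih (sec + 1) 0 s t chk h x hx2
      · simp only [pvScan, if_neg hc] at h
        split_ifs at h
        · exact ih sec (cnt + 1) (s + pvDigitVal c) (t + (s + pvDigitVal c)) chk h x hx2
        · exact ih sec (cnt + 1) s t (pvDigitVal c) h x hx2

set_option maxHeartbeats 1000000 in
theorem is_valid_CAS_code_spec : Claim_equal_is_valid_CAS_code := by
  intro cas _
  unfold Spec_is_valid_CAS_code
  cases hl : cas.toList with
  | nil =>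
    simp [is_valid_CAS_code, is_valid_CAS_code_alt, hl, pvScan]
  | cons c0 rest0 =>
    simp only [is_valid_CAS_code, is_valid_CAS_code_alt, hl, pvSplitOn_eq]
    rcases h3 : pvSplit (c0 :: rest0) with _ | ⟨s1, _ | ⟨s2, _ | ⟨s3, _ | ⟨s4, ps⟩⟩⟩⟩
    · exact absurd h3 (pvSplit_ne_nil _)
    · -- one piece: A returns False at len(lst)!=3, B's scan saw no dash
      have hB : pvScan (c0 :: rest0) 0 0 0 0 (-1) = false := by
        cases hb : pvScan (c0 :: rest0) 0 0 0 0 (-1)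
        · rfl
        · exfalso
          have hcnt := pvScan_count _ _ _ _ _ _ hb
          have hlen := pvSplit_length (c0 :: rest0)
          rw [h3] at hlen
          simp only [List.length_cons, List.length_nil] at hlen
          omega
      rw [hB]
      split <;> rfl
    · -- two pieces
      have hB : pvScan (c0 :: rest0) 0 0 0 0 (-1) = false := by
        cases hb : pvScan (c0 :: rest0) 0 0 0 0 (-1)
        · rfl
        · exfalso
          have hcnt := pvScan_count _ _ _ _ _ _ hb
          have hlen := pvSplit_length (c0 :: rest0)
          rw [h3] at hlen
          simp only [List.length_cons, List.length_nil] at hlen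
          omega
      rw [hB]
      split <;> rfl
    · -- exactly three pieces
      by_cases herr : pvLoopErr (c0 :: rest0) = true
      · rw [if_pos herr]
        have hB : pvScan (c0 :: rest0) 0 0 0 0 (-1) = false := by
          cases hb : pvScan (c0 :: rest0) 0 0 0 0 (-1)
          · rfl
          · exfalso
            rw [pvLoopErr_eq] at herr
            simp only [Bool.not_eq_true', List.all_eq_false] at herr
            obtain ⟨x, hxl, hx⟩ := herr
            have hv := pvScan_valid _ _ _ _ _ _ hb x hxl
            rw [pvContains_valid] at hx
            rcases hv with h | h
            · subst h; simp at hx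
            · rw [(pvIsdigit_iff x).mpr h] at hx; simp at hx
        rw [hB]
      · rw [if_neg herr]
        rw [pvLoopErr_eq] at herr
        simp only [Bool.not_eq_true, Bool.not_eq_false', List.all_eq_true] at herr
        have hflat := pvSplit_flatten (c0 :: rest0)
        rw [h3] at hflat
        simp only [List.flatten_cons, List.flatten_nil, List.append_nil] at hflat
        have hdig : ∀ x, x ∈ s1 ++ s2 ++ s3 → PySem.Chars.isdigit x = true := by
          intro x hx
          have hx2 : x ∈ s1 ++ (s2 ++ s3) := by simpa [List.append_assoc] using hx
          rw [hflat] at hx2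
          have hmf := List.mem_filter.mp hx2
          have hv := herr x hmf.1
          rw [pvContains_valid] at hv
          rcases Bool.or_eq_true_iff.mp hv with h | h
          · exact h
          · exact absurd h (by simpa using hmf.2)
        have hdig1 : ∀ x ∈ s1, PySem.Chars.isdigit x = true :=
          fun x hx => hdig x (by simp [hx])
        have hdig2 : ∀ x ∈ s2, PySem.Chars.isdigit x = true :=
          fun x hx => hdig x (by simp [hx])
        have hdig3 : ∀ x ∈ s3, PySem.Chars.isdigit x = true :=
          fun x hx => hdig x (by simp [hx])
        have hjoin := pvJoin_pvSplit (c0 :: rest0)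
        rw [h3] at hjoin
        have hL : c0 :: rest0 = s1 ++ '-' :: (s2 ++ '-' :: s3) := by
          rw [← hjoin]; simp [pvJoin]
        rw [hL]
        -- reduce A's three-piece match
        split
        next x y z hxyz =>
          injection hxyz with e1 hxyz
          injection hxyz with e2 hxyz
          injection hxyz with e3 _
          subst e1; subst e2; subst e3
          rcases s1 with _ | ⟨a, s1t⟩
          · -- section 1 empty: lst[0][0] raises in A; B fails the length test at the first dash
            have hB : pvScan (([] : List Char) ++ '-' :: (s2 ++ '-' :: s3)) 0 0 0 0 (-1) = false := by
              simp only [List.nil_append]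
              rw [pvScanDash, if_pos (by norm_num)]
            rw [hB]
            split_ifs <;> rfl
          · have hda : PySem.Chars.isdigit a = true := hdig1 a (by simp)
            have hRa : '0' ≤ a ∧ a ≤ '9' := (pvIsdigit_iff a).mp hda
            have hbnd := pvDigitVal_bounds a hda
            have hget : PySem.List.pyGet? (a :: s1t) 0 = some a := by
              simpa using PySem.List.pyGet?_natCast (a :: s1t) 0
            by_cases ha : a = '0'
            · -- leading zero: both sides reject
              subst ha
              have hB : pvScan (('0' :: s1t) ++ '-' :: (s2 ++ '-' :: s3)) 0 0 0 0 (-1) = false := by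
                simp only [List.cons_append]
                rw [pvScanDigit '0' _ _ _ _ _ _ (by decide), if_pos ⟨rfl, rfl, by decide⟩]
              rw [hB]
              split_ifs <;> simp
            · -- main path: a nonzero leading digit
              have hva := pvDigitVal_pos a hda ha
              have hstep0 : pvScan ((a :: s1t) ++ '-' :: (s2 ++ '-' :: s3)) 0 0 0 0 (-1)
                  = pvScan (s1t ++ '-' :: (s2 ++ '-' :: s3)) 0 1 (pvDigitVal a) (pvDigitVal a) (-1) := by
                rw [List.cons_append, pvScanDigit a _ _ _ _ _ _ hRa,
                    if_neg (by rintro ⟨_, _, hz⟩; omega), if_pos (by norm_num)]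
                norm_num
              have hrun1 := pvScanRun s1t ('-' :: (s2 ++ '-' :: s3)) 0 1 (pvDigitVal a)
                (pvDigitVal a) (-1) (Or.inl rfl) (Or.inr le_rfl)
                (fun c hc => (pvIsdigit_iff c).mp (hdig1 c (by simp [hc])))
              have hS1 : pvDigitVal a + pvDsum s1t = pvDsum (a :: s1t) := by simp [pvDsum]
              have hT1 : pvDigitVal a + (s1t.length : Int) * pvDigitVal a + pvWsum s1t
                  = pvWsum (a :: s1t) := by simp [pvWsum]; ring
              rw [hS1, hT1] at hrun1
              have hint1 : pvIntDigits? (a :: s1t)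
                  = some ((a :: s1t).foldl (fun x d => 10 * x + pvDigitVal d) 0) := by
                simp [pvIntDigits?]
              have hv1lt := pvFold_lt (a :: s1t) hdig1
              have hv1ge := pvFold_ge a s1t hdig1 hva
              by_cases hlen1 : 2 ≤ 1 + (s1t.length : Int) ∧ 1 + (s1t.length : Int) ≤ 7
              · -- section-1 length admissible
                have hdash1 : pvScan ('-' :: (s2 ++ '-' :: s3)) 0 (1 + (s1t.length : Int))
                    (pvDsum (a :: s1t)) (pvWsum (a :: s1t)) (-1)
                    = pvScan (s2 ++ '-' :: s3) 1 0 (pvDsum (a :: s1t)) (pvWsum (a :: s1t)) (-1) := by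
                  rw [pvScanDash, if_neg (by rintro ⟨_, hno⟩; exact hno hlen1),
                      if_neg (by rintro ⟨h01, _⟩; norm_num at h01), if_neg (by norm_num)]
                  norm_num
                have hrun2 := pvScanRun s2 ('-' :: s3) 1 0 (pvDsum (a :: s1t))
                  (pvWsum (a :: s1t)) (-1) (Or.inr rfl) (Or.inl rfl)
                  (fun c hc => (pvIsdigit_iff c).mp (hdig2 c hc))
                have hA1a : ¬ ((a :: s1t).foldl (fun x d => 10 * x + pvDigitVal d) 0 > 9999999) := by
                  have hmono : (10:Int) ^ (s1t.length + 1) ≤ 10 ^ 7 :=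
                    pow_le_pow_right₀ (by norm_num) (by omega)
                  simp only [List.length_cons] at hv1lt
                  norm_num at hmono
                  omega
                have hA1b : ¬ ((a :: s1t).foldl (fun x d => 10 * x + pvDigitVal d) 0 < 10) := by
                  have hmono : (10:Int) ^ 1 ≤ 10 ^ s1t.length :=
                    pow_le_pow_right₀ (by norm_num) (by omega)
                  norm_num at hmono
                  omega
                by_cases hlen2 : ((s2.length : Int)) = 2
                · -- two middle digits
                  have hdash2 : pvScan ('-' :: s3) 1 (0 + ((s2.length : Int)))
                      (pvDsum (a :: s1t) + pvDsum s2)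
                      (pvWsum (a :: s1t) + ((s2.length : Int)) * pvDsum (a :: s1t) + pvWsum s2) (-1)
                      = pvScan s3 2 0 (pvDsum (a :: s1t) + pvDsum s2)
                          (pvWsum ((a :: s1t) ++ s2)) (-1) := by
                    rw [pvWsum_append, pvScanDash, if_neg (by rintro ⟨h01, _⟩; norm_num at h01),
                        if_neg (by rintro ⟨_, hne⟩; omega), if_neg (by norm_num)]
                    norm_num
                  rcases s2 with _ | ⟨b, s2t⟩
                  · exfalso; norm_num at hlen2
                  have hint2 : pvIntDigits? (b :: s2t)
                      = some ((b :: s2t).foldl (fun x d => 10 * x + pvDigitVal d) 0) := by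
                    simp [pvIntDigits?]
                  have hv2lt := pvFold_lt (b :: s2t) hdig2
                  have hlen2' : (b :: s2t).length = 2 := by exact_mod_cast hlen2
                  have hA2 : ¬ ((b :: s2t).foldl (fun x d => 10 * x + pvDigitVal d) 0 > 99) := by
                    have h2 : (10:Int) ^ (b :: s2t).length = 100 := by
                      rw [hlen2']; norm_num
                    omega
                  rw [hstep0, hrun1, hdash1, hrun2, hdash2, pvScan2 s3]
                  rcases s3 with _ | ⟨e, s3r⟩
                  · -- s3 empty: A rejects at len(lst[2])!=1, B's scan ends in section 2 with no digit
                    rw [if_pos (by norm_num)]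
                  rcases s3r with _ | ⟨e2, s3rr⟩
                  · -- s3 = [e]: the real check-digit comparison
                    have hde : PySem.Chars.isdigit e = true := hdig3 e (by simp)
                    have hRe : '0' ≤ e ∧ e ≤ '9' := (pvIsdigit_iff e).mp hde
                    have hint3 : pvIntDigits? [e] = some (pvDigitVal e) := by
                      simp [pvIntDigits?]
                    have haccum : (PySem.List.enumerate ((a :: s1t) ++ b :: s2t).reverse).foldl
                        (fun acc p => acc + (p.1 + 1) * pvDigitVal p.2) 0
                        = pvWsum ((a :: s1t) ++ b :: s2t) := by
                      rw [PySem.List.foldl_add]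
                      simp only [zero_add]
                      rw [pvChecksum_rev, pvWsum_eq]
                    rw [if_neg (by norm_num)]
                    simp only [hget, hint1, hint2, hint3]
                    rw [if_neg ha, if_neg hA1a, if_neg hA1b, if_neg hA2,
                        if_neg (by simp [hlen2']), haccum, if_pos hRe]
                    by_cases hmod : PySem.Int.mod (pvWsum ((a :: s1t) ++ b :: s2t)) 10
                        = pvDigitVal e
                    · rw [if_neg (not_not_intro hmod)]
                      exact (decide_eq_true hmod).symm
                    · rw [if_pos hmod]
                      exact (decide_eq_false hmod).symm
                  · -- len(s3) ≥ 2: both reject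
                    rw [if_pos (by norm_num)]
                · -- middle section not exactly two digits: both reject
                  have hdash2 : pvScan ('-' :: s3) 1 (0 + ((s2.length : Int)))
                      (pvDsum (a :: s1t) + pvDsum s2)
                      (pvWsum (a :: s1t) + ((s2.length : Int)) * pvDsum (a :: s1t) + pvWsum s2) (-1)
                      = false := by
                    rw [pvScanDash, if_neg (by rintro ⟨h01, _⟩; norm_num at h01),
                        if_pos ⟨rfl, by omega⟩]
                  rw [hstep0, hrun1, hdash1, hrun2, hdash2]
                  by_cases h1 : s3.length ≠ 1
                  · rw [if_pos h1]
                  · rw [if_neg h1]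
                    simp only [hget, hint1]
                    rw [if_neg ha, if_neg hA1a, if_neg hA1b]
                    rcases s2 with _ | ⟨b, s2t⟩
                    · simp [pvIntDigits?]
                    · have hint2 : pvIntDigits? (b :: s2t)
                          = some ((b :: s2t).foldl (fun x d => 10 * x + pvDigitVal d) 0) := by
                        simp [pvIntDigits?]
                      have hlen2' : (b :: s2t).length ≠ 2 := by
                        intro hcon; exact hlen2 (by exact_mod_cast hcon)
                      simp only [hint2]
                      by_cases h2 : (b :: s2t).foldl (fun x d => 10 * x + pvDigitVal d) 0 > 99
                      · rw [if_pos h2]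
                      · rw [if_neg h2, if_pos hlen2']
              · -- section-1 length inadmissible: both reject
                have hdash1 : pvScan ('-' :: (s2 ++ '-' :: s3)) 0 (1 + (s1t.length : Int))
                    (pvDsum (a :: s1t)) (pvWsum (a :: s1t)) (-1) = false := by
                  rw [pvScanDash, if_pos ⟨rfl, hlen1⟩]
                rw [hstep0, hrun1, hdash1]
                have hbad : ((a :: s1t).foldl (fun x d => 10 * x + pvDigitVal d) 0 > 9999999)
                    ∨ ((a :: s1t).foldl (fun x d => 10 * x + pvDigitVal d) 0 < 10) := by
                  rcases (by omega : (s1t.length : Int) = 0 ∨ 8 ≤ 1 + (s1t.length : Int)) with h0 | h8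
                  · right
                    have hnil : s1t = [] := by
                      cases s1t with
                      | nil => rfl
                      | cons u v =>
                        exfalso
                        simp only [List.length_cons] at h0
                        push_cast at h0
                        omega
                    subst hnil
                    simp only [List.foldl_cons, List.foldl_nil]
                    omega
                  · left
                    have hmono : (10:Int) ^ 7 ≤ 10 ^ s1t.length :=
                      pow_le_pow_right₀ (by norm_num) (by omega)
                    norm_num at hmono
                    omega
                by_cases h1 : s3.length ≠ 1
                · rw [if_pos h1]
                · rw [if_neg h1]
                  simp only [hget, hint1]
                  rw [if_neg ha]
                  rcases hbad with hb1 | hb1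
                  · rw [if_pos hb1]
                  · rw [if_neg (by omega), if_pos hb1]
        next hno => exact absurd (rfl : [s1, s2, s3] = [s1, s2, s3]) (fun hh => hno s1 s2 s3 hh)
    · -- four or more pieces
      have hB : pvScan (c0 :: rest0) 0 0 0 0 (-1) = false := by
        cases hb : pvScan (c0 :: rest0) 0 0 0 0 (-1)
        · rfl
        · exfalso
          have hcnt := pvScan_count _ _ _ _ _ _ hb
          have hlen := pvSplit_length (c0 :: rest0)
          rw [h3] at hlen
          simp only [List.length_cons] at hlen
          omega
      rw [hB]
      split <;> rfl
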